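-- pv_equiv track=rewrite | github.com/KuongB/lab02-modeling | Source/latex_cleaner.py | normalize_display_math
-- ===== SOURCE A (Python) =====
-- def normalize_display_math(content: str) -> str:
--     """
--     Normalize display math to \\begin{equation} ... \\end{equation} format
--
--     Args:
--         content: LaTeX content
--
--     Returns:
--         Content with normalized display math
--     """
--     # Convert $$ ... $$ to \begin{equation*} ... \end{equation*}
--     # Split by $$
--     parts = content.split('$$')
--
--     result = []
--     for i, part in enumerate(parts):
--         if i % 2 == 0:
--             # Not in math mode
--             result.append(part)
--         else:
--             # In math mode - convert to equation*
--             result.append(r'\begin{equation*}' + part + r'\end{equation*}')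
--
--     return ''.join(result)
-- ===== SOURCE B (Python) =====
-- def normalize_display_math(content: str) -> str:
--     out = []
--     in_math = False
--     i = 0
--     n = len(content)
--     while i < n:
--         if content.startswith('$$', i):
--             out.append('\\end{equation*}' if in_math else '\\begin{equation*}')
--             in_math = not in_math
--             i += 2
--         else:
--             out.append(content[i])
--             i += 1
--     if in_math:
--         out.append('\\end{equation*}')
--     return ''.join(out)
-- ===== Notes on version B (the rewrite author's own statement) =====
-- stated objective: alternative
-- what changed: Replaced split-on-the-delimiter-and-wrap-odd-parts with a single left-to-right scan that toggles an in_math flag at each display-math delimiter and emits begin/end markers inline, closing at EOF if still in math mode.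
import Mathlib
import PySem

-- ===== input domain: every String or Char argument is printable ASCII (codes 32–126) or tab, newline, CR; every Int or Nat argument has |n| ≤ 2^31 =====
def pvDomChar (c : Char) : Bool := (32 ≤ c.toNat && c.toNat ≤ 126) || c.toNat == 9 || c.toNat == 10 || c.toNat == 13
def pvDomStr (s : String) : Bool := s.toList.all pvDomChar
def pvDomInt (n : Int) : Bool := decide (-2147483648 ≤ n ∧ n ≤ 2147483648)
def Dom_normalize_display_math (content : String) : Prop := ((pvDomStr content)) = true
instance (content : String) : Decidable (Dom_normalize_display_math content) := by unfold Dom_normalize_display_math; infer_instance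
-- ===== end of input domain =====

-- B replaces A's split-on-the-delimiter-and-wrap-odd-parts with a single left-to-right scan
-- toggling an in_math flag at each display-math delimiter (alternative decomposition, same cost).

-- ===== PORT A =====
-- content.split('$$'): the separator is the nonempty literal "$$", so split? is always `some`
-- and the getD default is never used
def normalize_display_math (content : String) : String :=
  let parts := (PySem.Str.split? content "$$").getD []
  let result := (PySem.List.enumerate parts 0).foldl
    (fun acc ip =>
      if PySem.Int.mod ip.1 2 = 0 then acc ++ [ip.2]
      else acc ++ ["\\begin{equation*}" ++ ip.2 ++ "\\end{equation*}"]) ([] : List String)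
  PySem.Str.join "" result

-- ===== PORT B =====
-- Source B's while loop over an index i becomes structural recursion on the remaining suffix;
-- content.startswith('$$', i) is the '$' :: '$' :: _ pattern, the EOF close is the [] case
def pvAltGo : List Char → Bool → List Char
  | [], inMath => if inMath then "\\end{equation*}".toList else []
  | '$' :: '$' :: rest, inMath =>
      (if inMath then "\\end{equation*}".toList else "\\begin{equation*}".toList) ++ pvAltGo rest (!inMath)
  | c :: rest, inMath => c :: pvAltGo rest inMath

def normalize_display_math_alt (content : String) : String :=
  String.ofList (pvAltGo content.toList false)

-- ===== PRECONDITION & SPEC =====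
def Spec_normalize_display_math (content : String) (out : String) : Prop := out = normalize_display_math_alt content
instance (content : String) (out : String) : Decidable (Spec_normalize_display_math content out) := by unfold Spec_normalize_display_math; infer_instance

-- ===== CLAIM (what is proved, stated in full; the proofs are below) =====
def Claim_equal_normalize_display_math : Prop := ∀ (content : String), Dom_normalize_display_math content → Spec_normalize_display_math content (normalize_display_math content)

-- ===== LEMMAS AND PROOFS =====

-- reference splitter: Python's split, specialised to the separator '$$'
def pvSplit2 : List Char → List (List Char)
  | [] => [[]]
  | '$' :: '$' :: rest => [] :: pvSplit2 rest
  | c :: rest =>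
      match pvSplit2 rest with
      | [] => [[c]]
      | p :: ps => (c :: p) :: ps

-- A's wrap-and-concatenate of the parts, the flag being the parity of the part index
def pvWJoin : List (List Char) → Bool → List Char
  | [], _ => []
  | p :: ps, b =>
      (if b then "\\begin{equation*}".toList ++ p ++ "\\end{equation*}".toList else p) ++ pvWJoin ps (!b)

theorem pvSplit2_ne_nil (cs : List Char) : pvSplit2 cs ≠ [] := by
  fun_induction pvSplit2 cs <;> simp_all

theorem pvAltGo_spec (cs : List Char) : ∀ (b : Bool),
    pvAltGo cs b = (match pvSplit2 cs with
      | [] => if b then "\\end{equation*}".toList else []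
      | p :: ps => (if b then p ++ "\\end{equation*}".toList ++ pvWJoin ps false
                    else pvWJoin (p :: ps) false)) := by
  fun_induction pvSplit2 cs with
  | case1 => intro b; cases b <;> simp [pvAltGo, pvWJoin]
  | case2 rest ih =>
    intro b
    have hne := pvSplit2_ne_nil rest
    rcases h : pvSplit2 rest with _ | ⟨q, qs⟩
    · exact absurd h hne
    · cases b <;> simp [pvAltGo, ih, h, pvWJoin]
  | case3 c rest h1 h2 ih => exact absurd h2 (pvSplit2_ne_nil rest)
  | case4 c rest h1 q qs h2 ih =>
    intro b
    have hc : pvAltGo (c :: rest) b = c :: pvAltGo rest b := by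
      rw [pvAltGo.eq_def]
      split
      · simp_all
      · rename_i r' heq
        injection heq with e1 e2
        exact absurd (h1 r' e1 e2) (by simp)
      · rename_i c' r' _ heq
        injection heq with e1 e2; subst e1; subst e2; rfl
    cases b <;> simp [hc, ih, h2, pvWJoin]

theorem pvSplit2_cons_ne (c : Char) (rest : List Char)
    (h : ¬ (c = '$' ∧ ∃ r', rest = '$' :: r')) :
    pvSplit2 (c :: rest) = (match pvSplit2 rest with
      | [] => [[c]]
      | p :: ps => (c :: p) :: ps) := by
  rw [pvSplit2.eq_def]
  split
  · simp_all
  · rename_i r' heq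
    injection heq with e1 e2
    exact absurd ⟨e1, r', e2⟩ h
  · rename_i c' r' _ heq
    injection heq with e1 e2; subst e1; subst e2; rfl

theorem pv_go_spec (fuel : Nat) : ∀ (l cur : List Char) (acc : List (List Char)),
    l.length < fuel →
    PySem.Chars.splitOn.go ['$', '$'] fuel l cur acc
      = acc.reverse ++ (match pvSplit2 l with
          | [] => [cur.reverse]
          | p :: ps => (cur.reverse ++ p) :: ps) := by
  induction fuel with
  | zero => intro l cur acc h; omega
  | succ n ih =>
    intro l cur acc h
    cases l with
    | nil => rw [PySem.Chars.splitOn.go.eq_def]; simp [pvSplit2]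
    | cons c rest =>
      cases rest with
      | nil =>
        rw [PySem.Chars.splitOn.go.eq_def]
        have hp : List.isPrefixOf ['$', '$'] [c] = false := by
          cases Decidable.em (c = '$') <;> simp_all [List.isPrefixOf]
        simp only [hp]
        rw [ih [] (c :: cur) acc (by simp only [List.length_nil, List.length_cons] at h ⊢; omega)]
        rw [pvSplit2_cons_ne c [] (by simp)]
        simp [pvSplit2]
      | cons d r2 =>
        rw [PySem.Chars.splitOn.go.eq_def]
        by_cases hcd : c = '$' ∧ d = '$'
        · obtain ⟨hc, hd⟩ := hcd; subst hc; subst hd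
          have hp : List.isPrefixOf ['$', '$'] ('$' :: '$' :: r2) = true := by
            simp [List.isPrefixOf]
          simp only [hp, if_true]
          rw [show List.drop (List.length ['$','$']) ('$' :: '$' :: r2) = r2 from rfl]
          rw [ih r2 [] (cur.reverse :: acc) (by simp at h ⊢; omega)]
          rcases hq : pvSplit2 r2 with _ | ⟨q, qs⟩
          · exact absurd hq (pvSplit2_ne_nil r2)
          · simp [pvSplit2, hq]
        · have hp : List.isPrefixOf ['$', '$'] (c :: d :: r2) = false := by
            simp [List.isPrefixOf]; tauto
          simp only [hp]
          rw [ih (d :: r2) (c :: cur) acc (by simp at h ⊢; omega)]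
          rw [pvSplit2_cons_ne c (d :: r2) (by rintro ⟨h1, r', h2⟩; injection h2 with h3 _; exact hcd ⟨h1, h3⟩)]
          rcases hq : pvSplit2 (d :: r2) with _ | ⟨q, qs⟩
          · exact absurd hq (pvSplit2_ne_nil _)
          · simp

theorem pv_splitOn_eq_split2 (cs : List Char) :
    PySem.Chars.splitOn cs ['$', '$'] = pvSplit2 cs := by
  rw [PySem.Chars.splitOn]
  rw [pv_go_spec (cs.length + 1) cs [] [] (by omega)]
  rcases hq : pvSplit2 cs with _ | ⟨q, qs⟩
  · exact absurd hq (pvSplit2_ne_nil cs)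
  · simp

theorem pv_flatten_intersperse_nil (xss : List (List Char)) :
    (List.intersperse ([] : List Char) xss).flatten = xss.flatten := by
  induction xss with
  | nil => rfl
  | cons x xs ih => cases xs <;> simp_all [List.intersperse]

theorem pv_join_nil_eq_flatten (xss : List (List Char)) :
    PySem.Chars.join [] xss = xss.flatten := by
  simp [PySem.Chars.join, List.intercalate, pv_flatten_intersperse_nil]

theorem pv_foldA (ps : List String) : ∀ (k : Int) (acc : List String), 0 ≤ k →
    (((PySem.List.enumerate ps k).foldl
      (fun acc ip =>
        if PySem.Int.mod ip.1 2 = 0 then acc ++ [ip.2]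
        else acc ++ ["\\begin{equation*}" ++ ip.2 ++ "\\end{equation*}"]) acc).map String.toList).flatten
    = (acc.map String.toList).flatten
      ++ pvWJoin (ps.map String.toList) (decide (PySem.Int.mod k 2 = 1)) := by
  induction ps with
  | nil => intro k acc hk; simp [PySem.List.enumerate_nil, pvWJoin]
  | cons p ps ih =>
    intro k acc hk
    rw [PySem.List.enumerate_cons, List.foldl_cons]
    have hm : PySem.Int.mod k 2 = k % 2 := PySem.Int.mod_eq_emod_of_pos (by norm_num)
    have hm1 : PySem.Int.mod (k + 1) 2 = (k + 1) % 2 := PySem.Int.mod_eq_emod_of_pos (by norm_num)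
    by_cases h0 : k % 2 = 0
    · have : PySem.Int.mod k 2 = 0 := by rw [hm]; exact h0
      rw [if_pos this]
      rw [ih (k + 1) (acc ++ [p]) (by omega)]
      simp [pvWJoin, show (k + 1) % 2 = 1 by omega, show ¬ (k % 2 = 1) by omega]
    · have h1 : k % 2 = 1 := by omega
      have : PySem.Int.mod k 2 = 1 := by rw [hm]; exact h1
      rw [if_neg (by rw [this]; norm_num)]
      rw [ih (k + 1) _ (by omega)]
      simp [pvWJoin, String.toList_append, h1, show ¬ ((k + 1) % 2 = 1) by omega]

theorem pv_main (content : String) :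
    normalize_display_math content = normalize_display_math_alt content := by
  unfold normalize_display_math normalize_display_math_alt
  apply String.toList_inj.mp
  simp only [String.toList_ofList, PySem.Str.toList_join]
  have hsep : ("" : String).toList = ([] : List Char) := rfl
  rw [hsep, pv_join_nil_eq_flatten]
  have hsplit : Option.map (fun x => List.map String.toList x) (PySem.Str.split? content "$$")
      = PySem.Chars.split? content.toList "$$".toList := PySem.Str.split?_map content "$$"
  have hsep2 : ("$$" : String).toList = ['$', '$'] := rfl
  rw [hsep2] at hsplit
  have hchars : PySem.Chars.split? content.toList ['$', '$']
      = some (PySem.Chars.splitOn content.toList ['$', '$']) := by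
    simp [PySem.Chars.split?]
  rw [hchars] at hsplit
  obtain ⟨l, hl, hlm⟩ : ∃ l, PySem.Str.split? content "$$" = some l
      ∧ l.map String.toList = PySem.Chars.splitOn content.toList ['$', '$'] := by
    cases hs : PySem.Str.split? content "$$" with
    | none => rw [hs] at hsplit; simp at hsplit
    | some l => rw [hs] at hsplit; exact ⟨l, rfl, by simpa using hsplit⟩
  rw [hl]
  simp only [Option.getD_some]
  rw [pv_foldA l 0 [] le_rfl]
  rw [hlm, pv_splitOn_eq_split2, pvAltGo_spec]
  rcases hq : pvSplit2 content.toList with _ | ⟨q, qs⟩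
  · exact absurd hq (pvSplit2_ne_nil _)
  · simp

-- ===== VERDICT (by name: the statement is the Claim_ definition above) =====
theorem normalize_display_math_spec : Claim_equal_normalize_display_math := by
  intro content _
  exact pv_main content
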